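-- pv_equiv track=rewrite | github.com/Jack19771/AIScrapper | cv_generator.py | _format_skills_for_ats
-- ===== SOURCE A (Python) =====
-- from typing import Dict, List, Any
--
-- def _format_skills_for_ats(user_skills: List[str], priority_skills: List[str]) -> str:
--     """Format skills section for ATS optimization"""
--
--     # Group skills by category
--     programming = []
--     frameworks = []
--     tools = []
--     cloud = []
--     databases = []
--     other = []
--
--     programming_keywords = ['python', 'java', 'javascript', 'c#', 'go', 'rust', 'kotlin']
--     framework_keywords = ['django', 'flask', 'fastapi', 'react', 'angular', 'vue', 'spring']
--     tool_keywords = ['docker', 'kubernetes', 'jenkins', 'git', 'gitlab', 'ci/cd']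
--     cloud_keywords = ['aws', 'azure', 'gcp', 'cloud']
--     db_keywords = ['mysql', 'postgresql', 'mongodb', 'redis', 'elasticsearch']
--
--     for skill in user_skills:
--         skill_lower = skill.lower()
--
--         if any(kw in skill_lower for kw in programming_keywords):
--             programming.append(skill)
--         elif any(kw in skill_lower for kw in framework_keywords):
--             frameworks.append(skill)
--         elif any(kw in skill_lower for kw in tool_keywords):
--             tools.append(skill)
--         elif any(kw in skill_lower for kw in cloud_keywords):
--             cloud.append(skill)
--         elif any(kw in skill_lower for kw in db_keywords):
--             databases.append(skill)
--         else:
--             other.append(skill)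
--
--     skill_sections = []
--
--     if programming:
--         skill_sections.append(f"Programming Languages: {', '.join(programming)}")
--     if frameworks:
--         skill_sections.append(f"Frameworks & Libraries: {', '.join(frameworks)}")
--     if cloud:
--         skill_sections.append(f"Cloud Platforms: {', '.join(cloud)}")
--     if databases:
--         skill_sections.append(f"Databases: {', '.join(databases)}")
--     if tools:
--         skill_sections.append(f"Tools & Technologies: {', '.join(tools)}")
--     if other:
--         skill_sections.append(f"Additional Skills: {', '.join(other)}")
--
--     return "\n".join(skill_sections)
-- ===== SOURCE B (Python) =====
-- from typing import List
--
-- def _partition(pred, xs):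
--     yes, no = [], []
--     for x in xs:
--         (yes if pred(x) else no).append(x)
--     return yes, no
--
-- def _hit(kws):
--     return lambda s: any(kw in s.lower() for kw in kws)
--
-- def _format_skills_for_ats(user_skills: List[str], priority_skills: List[str]) -> str:
--     # Peel categories off one at a time: each pass tests ONE keyword set on the remainder.
--     prog, rest = _partition(_hit(['python', 'java', 'javascript', 'c#', 'go', 'rust', 'kotlin']), user_skills)
--     fw, rest = _partition(_hit(['django', 'flask', 'fastapi', 'react', 'angular', 'vue', 'spring']), rest)
--     tools, rest = _partition(_hit(['docker', 'kubernetes', 'jenkins', 'git', 'gitlab', 'ci/cd']), rest)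
--     cloud, rest = _partition(_hit(['aws', 'azure', 'gcp', 'cloud']), rest)
--     db, other = _partition(_hit(['mysql', 'postgresql', 'mongodb', 'redis', 'elasticsearch']), rest)
--     return "\n".join(
--         f"{label}: {', '.join(bucket)}"
--         for label, bucket in [
--             ("Programming Languages", prog),
--             ("Frameworks & Libraries", fw),
--             ("Cloud Platforms", cloud),
--             ("Databases", db),
--             ("Tools & Technologies", tools),
--             ("Additional Skills", other),
--         ]
--         if bucket
--     )
-- ===== Notes on version B (the rewrite author's own statement) =====
-- stated objective: alternative
-- what changed: Replaces A's single loop that routes each skill through a six-way if/elif cascade into six accumulator lists by five staged partition passes: each pass tests exactly one keyword set and splits the shrinking remainder, so later keyword sets are only ever tested on skills no earlier category claimed; the output is then built from the buckets in display order.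
import Mathlib
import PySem

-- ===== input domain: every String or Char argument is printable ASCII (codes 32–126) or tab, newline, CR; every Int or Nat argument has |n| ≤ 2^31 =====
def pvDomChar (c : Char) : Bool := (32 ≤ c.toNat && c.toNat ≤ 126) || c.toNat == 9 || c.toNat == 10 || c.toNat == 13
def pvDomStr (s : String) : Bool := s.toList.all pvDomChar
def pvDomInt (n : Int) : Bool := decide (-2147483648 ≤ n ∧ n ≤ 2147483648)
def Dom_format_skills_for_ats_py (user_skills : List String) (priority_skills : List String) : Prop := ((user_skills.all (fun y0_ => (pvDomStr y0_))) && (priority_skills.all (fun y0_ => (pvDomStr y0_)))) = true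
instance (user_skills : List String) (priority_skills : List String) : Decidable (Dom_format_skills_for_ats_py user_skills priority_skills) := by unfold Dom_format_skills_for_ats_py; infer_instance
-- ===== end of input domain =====

-- B (alternative decomposition): five staged partition passes, each testing one keyword set
-- on the shrinking remainder, instead of A's single loop with a six-way if/elif cascade.

-- shared keyword literals (the same literal lists appear in both Pythons)
def pvProgKws : List String := ["python", "java", "javascript", "c#", "go", "rust", "kotlin"]
def pvFwKws : List String := ["django", "flask", "fastapi", "react", "angular", "vue", "spring"]
def pvToolKws : List String := ["docker", "kubernetes", "jenkins", "git", "gitlab", "ci/cd"]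
def pvCloudKws : List String := ["aws", "azure", "gcp", "cloud"]
def pvDbKws : List String := ["mysql", "postgresql", "mongodb", "redis", "elasticsearch"]

-- ===== PORT A =====
-- any(kw in skill_lower for kw in kws)
def pvAnyKw (kws : List String) (low : String) : Bool :=
  kws.any (fun kw => PySem.Str.isIn kw low)

-- the body of A's loop: route the skill into one of the six category lists
def pvStepA (st : List String × List String × List String × List String × List String × List String)
    (skill : String) :
    List String × List String × List String × List String × List String × List String :=
  let (p, f, t, c, d, o) := st
  let low := PySem.Str.lower skill
  if pvAnyKw pvProgKws low then (p ++ [skill], f, t, c, d, o)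
  else if pvAnyKw pvFwKws low then (p, f ++ [skill], t, c, d, o)
  else if pvAnyKw pvToolKws low then (p, f, t ++ [skill], c, d, o)
  else if pvAnyKw pvCloudKws low then (p, f, t, c ++ [skill], d, o)
  else if pvAnyKw pvDbKws low then (p, f, t, c, d ++ [skill], o)
  else (p, f, t, c, d, o ++ [skill])

def format_skills_for_ats_py (user_skills : List String) (priority_skills : List String) : String :=
  let st := user_skills.foldl pvStepA ([], [], [], [], [], [])
  let (p, f, t, c, d, o) := st
  let s0 : List String := []
  let s1 := if p ≠ [] then s0 ++ ["Programming Languages: " ++ PySem.Str.join ", " p] else s0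
  let s2 := if f ≠ [] then s1 ++ ["Frameworks & Libraries: " ++ PySem.Str.join ", " f] else s1
  let s3 := if c ≠ [] then s2 ++ ["Cloud Platforms: " ++ PySem.Str.join ", " c] else s2
  let s4 := if d ≠ [] then s3 ++ ["Databases: " ++ PySem.Str.join ", " d] else s3
  let s5 := if t ≠ [] then s4 ++ ["Tools & Technologies: " ++ PySem.Str.join ", " t] else s4
  let s6 := if o ≠ [] then s5 ++ ["Additional Skills: " ++ PySem.Str.join ", " o] else s5
  PySem.Str.join "\n" s6

-- ===== PORT B =====
-- _hit(kws): the one-keyword-set predicate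
def pvHit (kws : List String) (s : String) : Bool :=
  kws.any (fun kw => PySem.Str.isIn kw (PySem.Str.lower s))

-- _partition: hand-written loop appending into (yes, no)
def pvPartition (pred : String → Bool) (xs : List String) : List String × List String :=
  xs.foldl (fun (acc : List String × List String) x =>
    if pred x then (acc.1 ++ [x], acc.2) else (acc.1, acc.2 ++ [x])) ([], [])

def format_skills_for_ats_py_alt (user_skills : List String) (priority_skills : List String) : String :=
  let (prog, rest) := pvPartition (pvHit pvProgKws) user_skills
  let (fw, rest) := pvPartition (pvHit pvFwKws) rest
  let (tools, rest) := pvPartition (pvHit pvToolKws) rest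
  let (cloud, rest) := pvPartition (pvHit pvCloudKws) rest
  let (db, other) := pvPartition (pvHit pvDbKws) rest
  PySem.Str.join "\n"
    (([("Programming Languages", prog), ("Frameworks & Libraries", fw),
       ("Cloud Platforms", cloud), ("Databases", db),
       ("Tools & Technologies", tools), ("Additional Skills", other)]
        : List (String × List String)).filterMap
      (fun lb => if lb.2 ≠ [] then some (lb.1 ++ ": " ++ PySem.Str.join ", " lb.2) else none))

-- ===== PRECONDITION & SPEC =====
def Spec_format_skills_for_ats_py (user_skills : List String) (priority_skills : List String) (out : String) : Prop := out = format_skills_for_ats_py_alt user_skills priority_skills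
instance (user_skills : List String) (priority_skills : List String) (out : String) : Decidable (Spec_format_skills_for_ats_py user_skills priority_skills out) := by unfold Spec_format_skills_for_ats_py; infer_instance

-- ===== CLAIM (what is proved, stated in full; the proofs are below) =====
def Claim_equal_format_skills_for_ats_py : Prop := ∀ (user_skills : List String) (priority_skills : List String), Dom_format_skills_for_ats_py user_skills priority_skills → Spec_format_skills_for_ats_py user_skills priority_skills (format_skills_for_ats_py user_skills priority_skills)

-- ===== LEMMAS AND PROOFS =====

-- B's hand-written partition loop is (filter pred, filter ¬pred)
theorem pv_partition_spec (pred : String → Bool) (xs : List String) :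
    pvPartition pred xs = (xs.filter pred, xs.filter (fun x => !pred x)) := by
  unfold pvPartition
  suffices h : ∀ a b : List String,
      xs.foldl (fun (acc : List String × List String) x =>
        if pred x then (acc.1 ++ [x], acc.2) else (acc.1, acc.2 ++ [x])) (a, b)
      = (a ++ xs.filter pred, b ++ xs.filter (fun x => !pred x)) by
    simpa using h [] []
  induction xs with
  | nil => intro a b; simp
  | cons x xs ih =>
    intro a b
    by_cases h : pred x = true <;> simp [h, ih]

-- A's six fold accumulators are the successive-partition buckets, prefixed by the start state
-- proof-side helper: the singleton a skill contributes when its routing condition holds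
def pvSel (b : Bool) (s : String) : List String := if b then [s] else []

-- A's loop body, expressed through the staged routing conditions
theorem pv_step (p f t c d o : List String) (s : String) :
    pvStepA (p, f, t, c, d, o) s =
      (p ++ pvSel (pvHit pvProgKws s) s,
       f ++ pvSel (!pvHit pvProgKws s && pvHit pvFwKws s) s,
       t ++ pvSel (!pvHit pvProgKws s && (!pvHit pvFwKws s && pvHit pvToolKws s)) s,
       c ++ pvSel (!pvHit pvProgKws s && (!pvHit pvFwKws s && (!pvHit pvToolKws s && pvHit pvCloudKws s))) s,
       d ++ pvSel (!pvHit pvProgKws s && (!pvHit pvFwKws s && (!pvHit pvToolKws s && (!pvHit pvCloudKws s && pvHit pvDbKws s)))) s,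
       o ++ pvSel (!pvHit pvProgKws s && (!pvHit pvFwKws s && (!pvHit pvToolKws s && (!pvHit pvCloudKws s && !pvHit pvDbKws s)))) s) := by
  have hh : ∀ kws, pvAnyKw kws (PySem.Str.lower s) = pvHit kws s := fun _ => rfl
  unfold pvStepA pvSel
  simp only [hh]
  by_cases h1 : pvHit pvProgKws s = true <;>
  by_cases h2 : pvHit pvFwKws s = true <;>
  by_cases h3 : pvHit pvToolKws s = true <;>
  by_cases h4 : pvHit pvCloudKws s = true <;>
  by_cases h5 : pvHit pvDbKws s = true <;>
  simp [h1, h2, h3, h4, h5]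

-- A's six fold accumulators are the successive-partition buckets, prefixed by the start state
theorem pv_fold_parts (l : List String) (p f t c d o : List String) :
    l.foldl pvStepA (p, f, t, c, d, o)
    = (p ++ l.filter (pvHit pvProgKws),
       f ++ (l.filter (fun s => !pvHit pvProgKws s)).filter (pvHit pvFwKws),
       t ++ ((l.filter (fun s => !pvHit pvProgKws s)).filter (fun s => !pvHit pvFwKws s)).filter (pvHit pvToolKws),
       c ++ (((l.filter (fun s => !pvHit pvProgKws s)).filter (fun s => !pvHit pvFwKws s)).filter (fun s => !pvHit pvToolKws s)).filter (pvHit pvCloudKws),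
       d ++ ((((l.filter (fun s => !pvHit pvProgKws s)).filter (fun s => !pvHit pvFwKws s)).filter (fun s => !pvHit pvToolKws s)).filter (fun s => !pvHit pvCloudKws s)).filter (pvHit pvDbKws),
       o ++ ((((l.filter (fun s => !pvHit pvProgKws s)).filter (fun s => !pvHit pvFwKws s)).filter (fun s => !pvHit pvToolKws s)).filter (fun s => !pvHit pvCloudKws s)).filter (fun s => !pvHit pvDbKws s)) := by
  induction l generalizing p f t c d o with
  | nil => simp
  | cons s l ih =>
    rw [List.foldl_cons, pv_step, ih]
    by_cases h1 : pvHit pvProgKws s = true <;>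
    by_cases h2 : pvHit pvFwKws s = true <;>
    by_cases h3 : pvHit pvToolKws s = true <;>
    by_cases h4 : pvHit pvCloudKws s = true <;>
    by_cases h5 : pvHit pvDbKws s = true <;>
    simp [pvSel, h1, h2, h3, h4, h5, List.append_assoc]

-- ===== VERDICT (by name: the statement is the Claim_ definition above) =====
set_option maxHeartbeats 1600000 in
theorem format_skills_for_ats_py_spec : Claim_equal_format_skills_for_ats_py := by
  intro us ps _
  show _ = _
  unfold format_skills_for_ats_py format_skills_for_ats_py_alt
  rw [pv_fold_parts us [] [] [] [] [] []]
  simp only [pv_partition_spec, List.nil_append, List.filterMap_cons, List.filterMap_nil]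
  generalize us.filter (pvHit pvProgKws) = P
  generalize (us.filter (fun s => !pvHit pvProgKws s)).filter (pvHit pvFwKws) = F
  generalize ((us.filter (fun s => !pvHit pvProgKws s)).filter (fun s => !pvHit pvFwKws s)).filter (pvHit pvToolKws) = T
  generalize (((us.filter (fun s => !pvHit pvProgKws s)).filter (fun s => !pvHit pvFwKws s)).filter (fun s => !pvHit pvToolKws s)).filter (pvHit pvCloudKws) = C
  generalize ((((us.filter (fun s => !pvHit pvProgKws s)).filter (fun s => !pvHit pvFwKws s)).filter (fun s => !pvHit pvToolKws s)).filter (fun s => !pvHit pvCloudKws s)).filter (pvHit pvDbKws) = D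
  generalize ((((us.filter (fun s => !pvHit pvProgKws s)).filter (fun s => !pvHit pvFwKws s)).filter (fun s => !pvHit pvToolKws s)).filter (fun s => !pvHit pvCloudKws s)).filter (fun s => !pvHit pvDbKws s) = O
  by_cases h1 : P = [] <;> by_cases h2 : F = [] <;> by_cases h3 : T = [] <;>
  by_cases h4 : C = [] <;> by_cases h5 : D = [] <;> by_cases h6 : O = [] <;>
  simp [h1, h2, h3, h4, h5, h6]
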